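-- pv_equiv track=rewrite | github.com/DimitarGospodinov/first_rep | python advanced/file handling/line_numbers.py | count_letters_and_punctuations
-- ===== SOURCE A (Python) =====
-- def count_letters_and_punctuations(text):
--     result = []
--     for line in text:
--         line = line[:-1]
--         punctuations = 0
--         letters = 0
--         for word in line:
--             for char in word:
--                 if char in ["-", ",", ".", "!", "?", "'"]:
--                     punctuations += 1
--                 elif char.isalpha():
--                     letters += 1
--         result.append(f'{line} ({letters})({punctuations})')
--     return result
-- ===== SOURCE B (Python) =====
-- def count_letters_and_punctuations(text):
--     result = []
--     for line in text:
--         line = line[:-1]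
--         freq = {}
--         for ch in line:
--             freq[ch] = freq.get(ch, 0) + 1
--         punctuations = sum(freq.get(p, 0) for p in "-,.!?'")
--         letters = sum(v for ch, v in freq.items() if ch.isalpha())
--         result.append(f'{line} ({letters})({punctuations})')
--     return result
-- ===== Notes on version B (the rewrite author's own statement) =====
-- stated objective: alternative
-- what changed: Per line, instead of scanning characters with an if/elif branch updating two counters, B builds a character-frequency dict in one pass and then derives the punctuation count by six lookups and the letter count by aggregating over the distinct characters.
import Mathlib
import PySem

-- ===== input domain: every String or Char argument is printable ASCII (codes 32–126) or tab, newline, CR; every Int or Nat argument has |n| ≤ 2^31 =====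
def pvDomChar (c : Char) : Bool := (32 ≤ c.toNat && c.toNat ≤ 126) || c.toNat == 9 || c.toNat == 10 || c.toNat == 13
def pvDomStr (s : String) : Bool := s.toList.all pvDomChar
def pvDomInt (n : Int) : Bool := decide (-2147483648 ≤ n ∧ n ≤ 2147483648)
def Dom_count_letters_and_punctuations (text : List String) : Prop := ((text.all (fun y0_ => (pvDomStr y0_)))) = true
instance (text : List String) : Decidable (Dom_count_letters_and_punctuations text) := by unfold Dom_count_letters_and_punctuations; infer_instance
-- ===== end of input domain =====

-- B replaces A's per-character branching scan with a frequency table built once, then aggregates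
-- letters/punctuation over the distinct characters (alternative decomposition, same cost).

-- ===== PORT A =====
-- Python A iterates 'for word in line: for char in word'; iterating a str yields 1-char strings,
-- so char == word: the inner loop is one iteration over each character of line.
def count_letters_and_punctuations (text : List String) : List String :=
  text.foldl (fun result line0 =>
    let line := PySem.List.slice line0.toList none (some (-1))      -- line = line[:-1]
    let lp := line.foldl (fun (lp : Int × Int) char =>
      if char ∈ ['-', ',', '.', '!', '?', '\''] then (lp.1, lp.2 + 1)
      else if PySem.Chars.isalpha char then (lp.1 + 1, lp.2) else lp) (0, 0)
    -- f'{line} ({letters})({punctuations})'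
    result ++ [String.ofList (line ++ " (".toList ++ PySem.Int.toChars lp.1 ++ ")(".toList
                          ++ PySem.Int.toChars lp.2 ++ ")".toList)]) []

-- ===== PORT B =====
def count_letters_and_punctuations_alt (text : List String) : List String :=
  text.foldl (fun result line0 =>
    let line := PySem.List.slice line0.toList none (some (-1))      -- line = line[:-1]
    -- freq = {}; for ch in line: freq[ch] = freq.get(ch, 0) + 1
    let freq := line.foldl (fun (d : PySem.Dict Char Int) ch => d.insert ch (d.getD ch 0 + 1))
                  PySem.Dict.empty
    -- punctuations = sum(freq.get(p, 0) for p in "-,.!?'")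
    let punctuations : Int := ("-,.!?'".toList.map (fun p => freq.getD p 0)).sum
    -- letters = sum(v for ch, v in freq.items() if ch.isalpha())
    let letters : Int := ((freq.items.filter (fun kv => PySem.Chars.isalpha kv.1)).map (·.2)).sum
    result ++ [String.ofList (line ++ " (".toList ++ PySem.Int.toChars letters ++ ")(".toList
                          ++ PySem.Int.toChars punctuations ++ ")".toList)]) []

-- ===== PRECONDITION & SPEC =====
def Spec_count_letters_and_punctuations (text : List String) (out : List String) : Prop := out = count_letters_and_punctuations_alt text
instance (text : List String) (out : List String) : Decidable (Spec_count_letters_and_punctuations text out) := by unfold Spec_count_letters_and_punctuations; infer_instance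

-- ===== CLAIM (what is proved, stated in full; the proofs are below) =====
def Claim_equal_count_letters_and_punctuations : Prop := ∀ (text : List String), Dom_count_letters_and_punctuations text → Spec_count_letters_and_punctuations text (count_letters_and_punctuations text)

-- ===== LEMMAS AND PROOFS =====

-- A's scan, with the accumulator generalized: letters counts alpha non-punctuation chars,
-- punctuations counts the six punctuation marks.
theorem scanA (cs : List Char) (l p : Int) :
    cs.foldl (fun (lp : Int × Int) char =>
      if char ∈ ['-', ',', '.', '!', '?', '\''] then (lp.1, lp.2 + 1)
      else if PySem.Chars.isalpha char then (lp.1 + 1, lp.2) else lp) (l, p)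
    = (l + (cs.countP (fun c => !decide (c ∈ ['-', ',', '.', '!', '?', '\'']) && PySem.Chars.isalpha c) : Int),
       p + (cs.countP (fun c => decide (c ∈ ['-', ',', '.', '!', '?', '\''])) : Int)) := by
  induction cs generalizing l p with
  | nil => simp
  | cons c t ih =>
    rw [List.foldl_cons, List.countP_cons, List.countP_cons]
    by_cases hm : c ∈ ['-', ',', '.', '!', '?', '\'']
    · have ha : PySem.Chars.isalpha c = false := by
        fin_cases hm <;> decide
      rw [if_pos hm, ih]
      simp only [hm, ha, decide_true, Bool.not_true, Bool.false_and, if_true]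
      refine Prod.ext rfl ?_
      push_cast; ring
    · rw [if_neg hm]
      by_cases hal : PySem.Chars.isalpha c
      · rw [if_pos hal, ih]
        simp only [hm, hal, decide_false, Bool.not_false, Bool.true_and, if_true]
        refine Prod.ext ?_ rfl
        push_cast; ring
      · rw [if_neg hal, ih]
        simp [hm, hal]

-- a punctuation mark is never a letter, so A's "not punctuation, and alpha" test is just "alpha"
theorem lettersP_eq (cs : List Char) :
    cs.countP (fun c => !decide (c ∈ ['-', ',', '.', '!', '?', '\'']) && PySem.Chars.isalpha c)
    = cs.countP PySem.Chars.isalpha := by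
  apply List.countP_congr
  intro c _
  by_cases hm : c ∈ ['-', ',', '.', '!', '?', '\'']
  · have : PySem.Chars.isalpha c = false := by fin_cases hm <;> decide
    simp [hm, this]
  · simp [hm]

-- B's sum over items of the counter equals A's alpha count
theorem lettersB_eq (cs : List Char) :
    ((((cs.foldl (fun (d : PySem.Dict Char Int) ch => d.insert ch (d.getD ch 0 + 1))
        PySem.Dict.empty).items).filter (fun kv => PySem.Chars.isalpha kv.1)).map (·.2)).sum
    = (cs.countP PySem.Chars.isalpha : Int) := by
  rw [PySem.Dict.foldl_insert_getD_add_one_eq_counter, PySem.Dict.items_counter]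
  have h1 : (((PySem.Set.ofList cs).map (fun k => (k, (cs.count k : Int)))).filter
      (fun kv => PySem.Chars.isalpha kv.1)).map (·.2)
      = ((PySem.Set.ofList cs).filter PySem.Chars.isalpha).map (fun k => (cs.count k : Int)) := by
    simp [List.filter_map, Function.comp_def]
  rw [h1]
  have hperm : ((PySem.Set.ofList cs).filter PySem.Chars.isalpha).Perm
      (cs.dedup.filter PySem.Chars.isalpha) := by
    apply List.Perm.filter
    rw [List.perm_ext_iff_of_nodup (PySem.Set.nodup_ofList cs) cs.nodup_dedup]
    intro a; rw [PySem.Set.mem_ofList, List.mem_dedup]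
  rw [(hperm.map _).sum_eq]
  rw [show ((cs.dedup.filter PySem.Chars.isalpha).map (fun k => (cs.count k : Int)))
       = ((cs.dedup.filter PySem.Chars.isalpha).map (fun k => cs.count k)).map Nat.cast by
     simp [List.map_map, Function.comp_def]]
  rw [← Nat.cast_list_sum, List.sum_map_count_dedup_filter_eq_countP]

-- B's six lookups in the counter sum to A's punctuation count
theorem punctB_eq (cs : List Char) :
    ("-,.!?'".toList.map (fun p =>
      (cs.foldl (fun (d : PySem.Dict Char Int) ch => d.insert ch (d.getD ch 0 + 1))
        PySem.Dict.empty).getD p 0)).sum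
    = (cs.countP (fun c => decide (c ∈ ['-', ',', '.', '!', '?', '\''])) : Int) := by
  rw [PySem.Dict.foldl_insert_getD_add_one_eq_counter]
  have hs : "-,.!?'".toList = ['-', ',', '.', '!', '?', '\''] := by decide
  simp only [hs, List.map_cons, List.map_nil, PySem.Dict.getD_counter, List.sum_cons,
    List.sum_nil]
  induction cs with
  | nil => simp
  | cons c t ih =>
    simp only [List.count_cons, List.countP_cons]
    by_cases hm : c ∈ ['-', ',', '.', '!', '?', '\'']
    · fin_cases hm <;> simp_all <;> push_cast at ih ⊢ <;> linarith
    · obtain ⟨h1, h2, h3, h4, h5, h6⟩ :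
          c ≠ '-' ∧ c ≠ ',' ∧ c ≠ '.' ∧ c ≠ '!' ∧ c ≠ '?' ∧ c ≠ '\'' := by
        simp only [List.mem_cons, List.not_mem_nil, or_false] at hm; tauto
      simp only [hm, beq_iff_eq, h1, h2, h3, h4, h5, h6, if_false, decide_eq_true_eq,
        Nat.add_zero]
      push_cast at ih ⊢
      linarith

-- ===== VERDICT (by name: the statement is the Claim_ definition above) =====
theorem count_letters_and_punctuations_spec : Claim_equal_count_letters_and_punctuations := by
  intro text _
  unfold Spec_count_letters_and_punctuations count_letters_and_punctuations count_letters_and_punctuations_alt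
  rw [PySem.List.foldl_append_singleton_eq_map, PySem.List.foldl_append_singleton_eq_map]
  simp only [List.nil_append]
  apply List.map_congr_left
  intro line0 _
  simp only [scanA, zero_add, lettersB_eq, punctB_eq, lettersP_eq]
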